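-- pv_equiv track=rewrite | github.com/wiolaSzczepanik/Roguelike_game | coldwarm.py | compare_user_input_with_answer
-- ===== SOURCE A (Python) =====
-- def compare_user_input_with_answer(user_guess, correct_answer):
--     index = 0
--     hint_list = []
--     for a in correct_answer:
--         if str(a) == user_guess[index]:
--             hint_list.insert(0, 'HOT')
--         elif str(a) in user_guess:
--             hint_list.append("WARM")
--         index += 1
--     if not hint_list:
--         hint_list.append("COLD")
--
--     return hint_list
-- ===== SOURCE B (Python) =====
-- def compare_user_input_with_answer(user_guess, correct_answer):
--     strs = [str(a) for a in correct_answer]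
--     hot = sum(s == c for s, c in zip(strs, user_guess))
--     near = sum(s in user_guess for s in strs)
--     return ['HOT'] * hot + ['WARM'] * (near - hot) or ['COLD']
-- ===== Notes on version B (the rewrite author's own statement) =====
-- stated objective: simpler
-- what changed: B computes two independent aggregate counts - positional equalities over zip(strs, user_guess) and membership hits over all strs - and derives the WARM count by subtraction (every positional hit is also a membership hit), replacing A's single branching pass that mutates a hint list with insert(0)/append.
import Mathlib
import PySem

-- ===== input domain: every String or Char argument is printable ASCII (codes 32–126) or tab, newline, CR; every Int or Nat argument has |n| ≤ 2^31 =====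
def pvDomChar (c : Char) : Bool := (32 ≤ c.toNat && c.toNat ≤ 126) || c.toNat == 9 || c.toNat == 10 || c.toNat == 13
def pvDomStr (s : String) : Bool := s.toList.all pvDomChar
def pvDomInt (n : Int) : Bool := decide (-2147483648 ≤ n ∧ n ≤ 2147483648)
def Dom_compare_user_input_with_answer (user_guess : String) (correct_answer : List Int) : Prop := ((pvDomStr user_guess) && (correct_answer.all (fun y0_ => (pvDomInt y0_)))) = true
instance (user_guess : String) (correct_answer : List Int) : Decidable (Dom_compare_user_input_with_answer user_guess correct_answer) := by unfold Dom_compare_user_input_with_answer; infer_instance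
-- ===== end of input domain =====

-- B replaces A's branching pass (insert(0,'HOT')/append('WARM')) by two independent aggregate counts
-- (positional equality over zip, membership over all) with WARM obtained by subtraction: simpler, same cost.


-- ===== PORT A =====
-- A's loop: running index, hint_list with insert(0,'HOT') / append('WARM').
-- user_guess[index] is PySem.Str.pyGet?; the `none` case is Python's IndexError (excluded by Pre_).
def pvALoop (g : String) (l : List Int) (index : Int) (hint : List String) : List String :=
  match l with
  | [] => hint
  | a :: rest =>
    match PySem.Str.pyGet? g index with
    | none => hint  -- IndexError in Python; unreachable under Pre_
    | some c =>
      if (PySem.Int.toStr a).toList = [c] then pvALoop g rest (index + 1) ("HOT" :: hint)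
      else if PySem.Str.isIn (PySem.Int.toStr a) g then pvALoop g rest (index + 1) (hint ++ ["WARM"])
      else pvALoop g rest (index + 1) hint

def compare_user_input_with_answer (user_guess : String) (correct_answer : List Int) : List String :=
  let hint_list := pvALoop user_guess correct_answer 0 []
  if hint_list = [] then ["COLD"] else hint_list

-- ===== PORT B =====
-- Source B: strs = [str(a) for a in correct_answer]; hot = Σ (s == c) over zip(strs, user_guess);
-- near = Σ (s in user_guess) over strs; result = HOT*hot ++ WARM*(near-hot) or COLD.
def compare_user_input_with_answer_alt (user_guess : String) (correct_answer : List Int) : List String :=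
  let strs := correct_answer.map PySem.Int.toStr
  let hot := (List.zip strs user_guess.toList).countP (fun p => p.1.toList = [p.2])
  let near := strs.countP (fun s => PySem.Str.isIn s user_guess)
  let hints := List.replicate hot "HOT" ++ List.replicate (near - hot) "WARM"
  if hints = [] then ["COLD"] else hints

-- ===== PRECONDITION & SPEC =====
-- A raises IndexError when the guess has fewer characters than there are answers; Pre_ excludes exactly that.
def Pre_compare_user_input_with_answer (user_guess : String) (correct_answer : List Int) : Prop :=
  correct_answer.length ≤ user_guess.toList.length
instance (user_guess : String) (correct_answer : List Int) : Decidable (Pre_compare_user_input_with_answer user_guess correct_answer) := by unfold Pre_compare_user_input_with_answer; infer_instance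

def pvWitness_compare_user_input_with_answer : String × List Int := ("12a", [1, 3])

def Spec_compare_user_input_with_answer (user_guess : String) (correct_answer : List Int) (out : List String) : Prop := out = compare_user_input_with_answer_alt user_guess correct_answer
instance (user_guess : String) (correct_answer : List Int) (out : List String) : Decidable (Spec_compare_user_input_with_answer user_guess correct_answer out) := by unfold Spec_compare_user_input_with_answer; infer_instance

-- ===== CLAIM (what is proved, stated in full; the proofs are below) =====
def Claim_equal_compare_user_input_with_answer : Prop := ∀ (user_guess : String) (correct_answer : List Int), Dom_compare_user_input_with_answer user_guess correct_answer → Pre_compare_user_input_with_answer user_guess correct_answer → Spec_compare_user_input_with_answer user_guess correct_answer (compare_user_input_with_answer user_guess correct_answer)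

-- ===== LEMMAS AND PROOFS =====
-- Proof-only counter loop mirroring A's pass: (hot, warm) accumulators.
def pvCnt (g : String) (l : List Int) (i : Nat) (hot warm : Nat) : Nat × Nat :=
  match l with
  | [] => (hot, warm)
  | a :: rest =>
    match PySem.Str.pyGet? g (i : Int) with
    | none => (hot, warm)
    | some c =>
      if (PySem.Int.toStr a).toList = [c] then pvCnt g rest (i + 1) (hot + 1) warm
      else if PySem.Str.isIn (PySem.Int.toStr a) g then pvCnt g rest (i + 1) hot (warm + 1)
      else pvCnt g rest (i + 1) hot warm

-- A singleton list of a member is an infix.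
theorem pv_singleton_infix {α : Type} {c : α} {l : List α} (h : c ∈ l) : [c] <:+: l := by
  induction l with
  | nil => cases h
  | cons b t ih =>
    rcases List.mem_cons.mp h with rfl | h'
    · exact ⟨[], t, rfl⟩
    · exact (ih h').trans (List.infix_cons (List.infix_refl t))

-- A's loop produces exactly the HOT/WARM block described by the counters.
theorem pvLoop_eq (g : String) (l : List Int) :
    ∀ (i h w : Nat), i + l.length ≤ g.toList.length →
      pvALoop g l (i : Int) (List.replicate h "HOT" ++ List.replicate w "WARM") =
        List.replicate (pvCnt g l i h w).1 "HOT" ++ List.replicate (pvCnt g l i h w).2 "WARM" := by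
  induction l with
  | nil => intro i h w _; simp [pvALoop, pvCnt]
  | cons a rest ih =>
    intro i h w hle
    simp only [List.length_cons] at hle
    have hi : i < g.toList.length := by omega
    have hget : PySem.Str.pyGet? g (i : Int) = some g.toList[i] := by
      simp [List.getElem?_eq_getElem hi]
    have hcast : (i : Int) + 1 = ((i + 1 : Nat) : Int) := by push_cast; ring
    by_cases heq : (PySem.Int.toStr a).toList = [g.toList[i]]
    · have hrep : ("HOT" :: (List.replicate h "HOT" ++ List.replicate w "WARM"))
          = List.replicate (h + 1) "HOT" ++ List.replicate w "WARM" := by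
        simp [List.replicate_succ]
      rw [pvALoop, pvCnt, hget]
      dsimp only
      rw [if_pos heq, if_pos heq, hcast, hrep]
      exact ih (i + 1) (h + 1) w (by omega)
    · by_cases hin : PySem.Str.isIn (PySem.Int.toStr a) g
      · have hrep : (List.replicate h "HOT" ++ List.replicate w "WARM") ++ ["WARM"]
            = List.replicate h "HOT" ++ List.replicate (w + 1) "WARM" := by
          simp [List.replicate_succ']
        rw [pvALoop, pvCnt, hget]
        dsimp only
        rw [if_neg heq, if_neg heq, if_pos hin, if_pos hin, hcast, hrep]
        exact ih (i + 1) h (w + 1) (by omega)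
      · rw [pvALoop, pvCnt, hget]
        dsimp only
        rw [if_neg heq, if_neg heq, if_neg hin, if_neg hin, hcast]
        exact ih (i + 1) h w (by omega)

-- The counters equal B's aggregates: hot = positional-equality count over the zipped tail,
-- and hot + warm = membership count (every positional hit is also a membership hit).
theorem pvCnt_eq (g : String) (l : List Int) :
    ∀ (i h w : Nat), i + l.length ≤ g.toList.length →
      (pvCnt g l i h w).1
        = h + (List.zip (l.map PySem.Int.toStr) (g.toList.drop i)).countP (fun p => p.1.toList = [p.2]) ∧
      (pvCnt g l i h w).1 + (pvCnt g l i h w).2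
        = h + w + (l.map PySem.Int.toStr).countP (fun s => PySem.Str.isIn s g) := by
  induction l with
  | nil => intro i h w _; simp [pvCnt]
  | cons a rest ih =>
    intro i h w hle
    simp only [List.length_cons] at hle
    have hi : i < g.toList.length := by omega
    have hget : PySem.Str.pyGet? g (i : Int) = some g.toList[i] := by
      simp [List.getElem?_eq_getElem hi]
    have hdrop : g.toList.drop i = g.toList[i] :: g.toList.drop (i + 1) :=
      List.drop_eq_getElem_cons hi
    rw [List.map_cons, hdrop, List.zip_cons_cons]
    simp only [List.countP_cons]
    by_cases heq : (PySem.Int.toStr a).toList = [g.toList[i]]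
    · have hmem : PySem.Str.isIn (PySem.Int.toStr a) g = true := by
        rw [PySem.Str.isIn_iff_infix, heq]
        exact pv_singleton_infix (List.getElem_mem hi)
      have hd : (decide ((PySem.Int.toStr a).toList = [g.toList[i]]) = true) := by simpa using heq
      obtain ⟨ih1, ih2⟩ := ih (i + 1) (h + 1) w (by omega)
      rw [pvCnt, hget]
      dsimp only
      rw [if_pos heq]
      constructor
      · rw [ih1, if_pos hd]; omega
      · rw [ih2, if_pos hmem]; omega
    · have hd : ¬ (decide ((PySem.Int.toStr a).toList = [g.toList[i]]) = true) := by simpa using heq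
      by_cases hin : PySem.Str.isIn (PySem.Int.toStr a) g
      · obtain ⟨ih1, ih2⟩ := ih (i + 1) h (w + 1) (by omega)
        rw [pvCnt, hget]
        dsimp only
        rw [if_neg heq, if_pos hin]
        constructor
        · rw [ih1, if_neg hd]; omega
        · rw [ih2, if_pos hin]; omega
      · obtain ⟨ih1, ih2⟩ := ih (i + 1) h w (by omega)
        rw [pvCnt, hget]
        dsimp only
        rw [if_neg heq, if_neg hin]
        constructor
        · rw [ih1, if_neg hd]; omega
        · rw [ih2, if_neg hin]; omega

-- ===== VERDICT (by name: the statement is the Claim_ definition above) =====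
theorem compare_user_input_with_answer_spec : Claim_equal_compare_user_input_with_answer := by
  intro g ca _ hpre
  unfold Spec_compare_user_input_with_answer compare_user_input_with_answer compare_user_input_with_answer_alt
  have hle : 0 + ca.length ≤ g.toList.length := by simpa using hpre
  have h0 := pvLoop_eq g ca 0 0 0 hle
  obtain ⟨h1, h2⟩ := pvCnt_eq g ca 0 0 0 hle
  simp only [List.drop_zero, Nat.zero_add, Nat.cast_zero, List.replicate_zero,
    List.append_nil] at h0 h1 h2
  have e2 : (pvCnt g ca 0 0 0).2
      = (ca.map PySem.Int.toStr).countP (fun s => PySem.Str.isIn s g)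
        - (List.zip (ca.map PySem.Int.toStr) g.toList).countP (fun p => p.1.toList = [p.2]) := by
    omega
  rw [h0, h1, e2]
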